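-- pv_equiv track=rewrite | github.com/LukianovVS/signalgen | prngps.py | genL1CA
-- ===== SOURCE A (Python) =====
-- Len_prn_L1CA = 1023
--
-- def genL1CA(prn):
--     """ C/A code generation
--
-- param in: prn - number of PRN (SV)
-- return: list of code
--     """
--     if prn < 1:
--         raise ValueError('PRN must be more 0')
--     elif prn > 37:
--         raise ValueError('todo add support SBAS...')
--
--
--     # G1 and G2 sequence (1023-bit Gold-code), init
--     G1 = [1] * 10
--     G2 = [1] * 10
--
--     # generated PRN, init
--     prn_list = [0] * Len_prn_L1CA
--
--     # table for converting a sequence G2 to G2i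
--     G2_to_G2i = [ [ 2,  6], # 1
--                   [ 3,  7],
--                   [ 4,  8],
--                   [ 5,  9],
--                   [ 1,  9], # 5
--                   [ 2, 10],
--                   [ 1,  8],
--                   [ 2,  9],
--                   [ 3, 10],
--                   [ 2,  3], # 10
--                   [ 3,  4],
--                   [ 5,  6],
--                   [ 6,  7],
--                   [ 7,  8],
--                   [ 8,  9], # 15
--                   [ 9, 10],
--                   [ 1,  4],
--                   [ 2,  5],
--                   [ 3,  6],
--                   [ 4,  7]  # 20
--                   ]
--     # for using as index of list
--     prn_i = prn - 1
--     ind_xor = [G2_to_G2i[prn_i][0] - 1, G2_to_G2i[prn_i][1] - 1]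
--
--
--     for i in range(Len_prn_L1CA):
--         prn_list[i] = G1[-1] ^ \
--                  ( G2[ind_xor[0]] ^ G2[ind_xor[1]] )
--
--         g_new = G1[3 - 1] ^ G1[10 - 1]
--         G1 =  [g_new] + G1[0:-1]
--
--         g_new = G2[2 - 1] ^ G2[3 - 1] ^ G2[6 - 1] ^ G2[8 - 1] ^ G2[9 - 1] ^ G2[10 - 1]
--         G2 = [g_new] + G2[0:-1]
--     return prn_list
-- ===== SOURCE B (Python) =====
-- Len_prn_L1CA = 1023
--
-- # Standard per-PRN G2 cyclic delays (chips) for PRN 1..20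
-- _DELAY = [5, 6, 7, 8, 17, 18, 139, 140, 141, 251,
--           252, 254, 255, 256, 257, 258, 469, 470, 471, 472]
--
-- def _lfsr_out(taps):
--     """Full 1023-chip output sequence of a 10-stage LFSR started at all ones."""
--     out = []
--     r = [1] * 10
--     for _ in range(Len_prn_L1CA):
--         out.append(r[9])
--         g = 0
--         for t in taps:
--             g ^= r[t - 1]
--         r = [g] + r[:9]
--     return out
--
-- def genL1CA(prn):
--     """C/A code: G1 sequence XOR cyclically delayed G2 sequence."""
--     if prn < 1:
--         raise ValueError('PRN must be more 0')
--     elif prn > 37: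
--         raise ValueError('todo add support SBAS...')
--     d = _DELAY[prn - 1]
--     g1 = _lfsr_out([3, 10])
--     g2 = _lfsr_out([2, 3, 6, 8, 9, 10])
--     g2d = g2[Len_prn_L1CA - d:] + g2[:Len_prn_L1CA - d]   # g2 delayed by d chips
--     return [a ^ b for a, b in zip(g1, g2d)]
-- ===== Notes on version B (the rewrite author's own statement) =====
-- stated objective: alternative
-- what changed: B generates the full G1 and G2 LFSR output sequences once (each in its own loop) and forms the code as G1 XOR a cyclically delayed G2 using the standard per-PRN delay table, replacing A's in-loop two-tap phase selection on the live register.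
import Mathlib
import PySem

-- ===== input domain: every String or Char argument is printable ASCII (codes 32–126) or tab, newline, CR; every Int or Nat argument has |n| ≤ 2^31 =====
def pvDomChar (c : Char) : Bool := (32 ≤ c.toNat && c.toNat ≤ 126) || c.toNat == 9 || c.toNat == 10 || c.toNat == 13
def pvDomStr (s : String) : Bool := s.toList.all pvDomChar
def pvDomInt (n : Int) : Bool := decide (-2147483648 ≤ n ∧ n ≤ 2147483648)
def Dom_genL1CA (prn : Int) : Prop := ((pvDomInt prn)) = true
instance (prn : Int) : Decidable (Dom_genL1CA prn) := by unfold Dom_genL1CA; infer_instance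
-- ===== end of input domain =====

-- B generates the plain G1 and G2 LFSR output sequences once and combines them with a
-- per-PRN cyclic delay, instead of A's in-loop tap-pair phase selection (alternative decomposition).

-- ===== PORT A =====
-- A's register update (both shifts of one loop iteration)
def genL1CA_stepA (st : List Int × List Int) : List Int × List Int :=
  (PySem.Int.bxor ((PySem.List.pyGet? st.1 2).getD 0) ((PySem.List.pyGet? st.1 9).getD 0)
     :: PySem.List.slice st.1 (some 0) (some (-1)),
   PySem.Int.bxor ((PySem.List.pyGet? st.2 1).getD 0)
     (PySem.Int.bxor ((PySem.List.pyGet? st.2 2).getD 0)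
     (PySem.Int.bxor ((PySem.List.pyGet? st.2 5).getD 0)
     (PySem.Int.bxor ((PySem.List.pyGet? st.2 7).getD 0)
     (PySem.Int.bxor ((PySem.List.pyGet? st.2 8).getD 0) ((PySem.List.pyGet? st.2 9).getD 0)))))
     :: PySem.List.slice st.2 (some 0) (some (-1)))

-- A's chip at the current state: G1[-1] ^ (G2[i0] ^ G2[i1])
def genL1CA_outA (i0 i1 : Int) (st : List Int × List Int) : Int :=
  PySem.Int.bxor ((PySem.List.pyGet? st.1 (-1)).getD 0)
    (PySem.Int.bxor ((PySem.List.pyGet? st.2 i0).getD 0) ((PySem.List.pyGet? st.2 i1).getD 0))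

-- A's main loop: emit one chip, advance both registers
def genL1CA_loop (i0 i1 : Int) (st : List Int × List Int) : Nat → List Int
  | 0 => []
  | n+1 => genL1CA_outA i0 i1 st :: genL1CA_loop i0 i1 (genL1CA_stepA st) n

def genL1CA (prn : Int) : List Int :=
  if prn < 1 then []            -- ValueError in Python; outside Pre_
  else if prn > 37 then []      -- ValueError in Python; outside Pre_
  else
    let G2_to_G2i : List (List Int) :=
      [[2,6],[3,7],[4,8],[5,9],[1,9],[2,10],[1,8],[2,9],[3,10],[2,3],
       [3,4],[5,6],[6,7],[7,8],[8,9],[9,10],[1,4],[2,5],[3,6],[4,7]]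
    let row := (PySem.List.pyGet? G2_to_G2i (prn - 1)).getD []   -- IndexError for prn 21..37; outside Pre_
    let i0 := (PySem.List.pyGet? row 0).getD 0 - 1
    let i1 := (PySem.List.pyGet? row 1).getD 0 - 1
    genL1CA_loop i0 i1 (List.replicate 10 1, List.replicate 10 1) 1023

-- ===== PORT B =====
def genL1CA_altDelay : List Int :=
  [5, 6, 7, 8, 17, 18, 139, 140, 141, 251, 252, 254, 255, 256, 257, 258, 469, 470, 471, 472]

-- one register shift with the given taps (r = [g] + r[:9])
def genL1CA_lfsrStep (taps : List Int) (r : List Int) : List Int :=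
  taps.foldl (fun g t => PySem.Int.bxor g ((PySem.List.pyGet? r (t - 1)).getD 0)) 0
    :: PySem.List.slice r (some 0) (some 9)

-- _lfsr_out's loop: emit r[9], shift
def genL1CA_lfsrLoop (taps : List Int) (r : List Int) : Nat → List Int
  | 0 => []
  | n+1 => ((PySem.List.pyGet? r 9).getD 0) :: genL1CA_lfsrLoop taps (genL1CA_lfsrStep taps r) n

def genL1CA_alt (prn : Int) : List Int :=
  if prn < 1 then []
  else if prn > 37 then []
  else
    let d := (PySem.List.pyGet? genL1CA_altDelay (prn - 1)).getD 0
    let g1 := genL1CA_lfsrLoop [3, 10] (List.replicate 10 1) 1023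
    let g2 := genL1CA_lfsrLoop [2, 3, 6, 8, 9, 10] (List.replicate 10 1) 1023
    let g2d := PySem.List.slice g2 (some (1023 - d)) none ++ PySem.List.slice g2 none (some (1023 - d))
    List.zipWith (fun a b => PySem.Int.bxor a b) g1 g2d

-- ===== PRECONDITION & SPEC =====
-- Pre_ excludes prn < 1 and prn > 37 (ValueError in A) and prn in 21..37 (IndexError on A's 20-entry table)
def Pre_genL1CA (prn : Int) : Prop := 1 ≤ prn ∧ prn ≤ 20
instance (prn : Int) : Decidable (Pre_genL1CA prn) := by unfold Pre_genL1CA; infer_instance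
def pvWitness_genL1CA : Int := 1

def Spec_genL1CA (prn : Int) (out : List Int) : Prop := out = genL1CA_alt prn
instance (prn : Int) (out : List Int) : Decidable (Spec_genL1CA prn out) := by unfold Spec_genL1CA; infer_instance

-- ===== CLAIM (what is proved, stated in full; the proofs are below) =====
def Claim_equal_genL1CA : Prop := ∀ (prn : Int), Dom_genL1CA prn → Pre_genL1CA prn → Spec_genL1CA prn (genL1CA prn)

-- ===== LEMMAS AND PROOFS =====

-- the stage-10 output of B's G2/G1 register after k shifts
def pvO (taps r : List Int) (k : Nat) : Int :=
  (PySem.List.pyGet? ((genL1CA_lfsrStep taps)^[k] r) 9).getD 0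

-- well-formed register: ten cells, each 0 or 1
def pvOk (r : List Int) : Prop := r.length = 10 ∧ ∀ x ∈ r, x = 0 ∨ x = 1

-- the literal G2 output sequence (1032 chips, enough for every index t + 9 - j, t < 1023)
def pvG2Lit : List Int := [1, 1, 1, 1, 1, 1, 1, 1, 1, 1, 0, 0, 1, 0, 1, 1, 0, 1, 0, 0, 1, 0, 1, 0, 1, 1, 1, 1, 0, 1, 0, 1, 0, 0, 0, 0, 0, 1, 1, 1, 1, 1, 0, 1, 0, 1, 0, 1, 0, 1, 1, 0, 1, 0, 0, 0, 0, 0, 1, 0, 1, 0, 0, 1, 1, 1, 0, 1, 1, 1, 0, 0, 1, 0, 0, 0, 0, 1, 1, 0, 1, 0, 0, 0, 1, 1, 0, 0, 1, 1, 1, 1, 1, 0, 1, 1, 1, 1, 0, 1, 1, 0, 1, 0, 0, 1, 1, 1, 1, 0, 0, 1, 0, 1, 0, 0, 0, 1, 1, 1, 1, 0, 1, 1, 0, 0, 0, 1, 0, 0, 1, 0, 1, 1, 1, 1, 0, 1, 1, 1, 1, 1, 1, 0, 1, 0, 0, 1, 0, 0, 1, 0, 1, 1, 0, 1, 1, 0,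 0, 1, 0, 0, 0, 0, 0, 1, 1, 0, 1, 0, 1, 0, 0, 0, 1, 0, 0, 0, 0, 1, 0, 1, 0, 0, 0, 1, 0, 1, 0, 1, 0, 1, 1, 1, 1, 1, 1, 1, 0, 1, 0, 1, 1, 1, 1, 0, 0, 0, 0, 1, 1, 0, 1, 1, 0, 1, 0, 0, 0, 1, 0, 0, 1, 0, 0, 1, 0, 0, 1, 1, 0, 0, 0, 1, 0, 1, 0, 1, 1, 1, 0, 0, 0, 1, 0, 0, 1, 1, 1, 0, 0, 0, 0, 0, 0, 0, 1, 0, 0, 1, 0, 1, 0, 1, 0, 1, 0, 1, 0, 0, 0, 1, 1, 0, 1, 1, 0, 0, 0, 1, 1, 0, 0, 1, 0, 1, 0, 0, 1, 1, 0, 0, 0, 0, 0, 0, 1, 0, 1, 0, 1, 1, 0, 0, 1, 1, 0, 0, 1, 0, 0, 1, 1, 1, 1, 1, 1, 0, 0, 1, 1, 1, 0, 1, 0, 0, 1, 0, 1, 1, 1, 0, 0, 0, 0, 0, 1, 0, 0, 1, 1, 1, 1, 0, 1, 1, 1, 0, 1, 0, 1, 0, 0, 1, 0, 1, 0, 0,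 1, 0, 0, 1, 1, 1, 0, 1, 0, 1, 1, 1, 0, 0, 1, 1, 1, 1, 0, 1, 0, 1, 1, 0, 1, 1, 1, 1, 0, 0, 0, 1, 1, 0, 1, 0, 1, 1, 0, 1, 0, 1, 0, 1, 1, 0, 0, 0, 1, 1, 1, 0, 0, 1, 0, 0, 1, 0, 0, 0, 1, 1, 1, 1, 1, 1, 0, 1, 1, 0, 0, 1, 1, 1, 1, 0, 0, 0, 0, 0, 1, 1, 0, 0, 0, 0, 1, 1, 0, 0, 1, 1, 0, 1, 0, 1, 0, 1, 0, 0, 1, 1, 0, 1, 0, 1, 1, 1, 1, 1, 0, 1, 1, 0, 1, 1, 0, 0, 0, 0, 1, 1, 1, 0, 0, 0, 1, 1, 1, 0, 1, 1, 1, 1, 0, 0, 1, 1, 0, 1, 0, 0, 0, 0, 1, 1, 1, 0, 1, 0, 0, 0, 0, 0, 0, 0, 0, 1, 1, 1, 0, 0, 1, 1, 0, 0, 1, 1, 0, 0, 0, 0, 1, 0, 0, 1, 0, 0, 0, 0, 1, 0, 0, 0, 1, 1, 0, 0, 0, 1, 0, 0, 0, 0, 0, 0, 0, 1, 1, 0,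 0, 1, 0, 0, 0, 1, 0, 0, 0, 1, 1, 1, 0, 1, 0, 1, 0, 1, 1, 1, 0, 1, 0, 0, 1, 1, 1, 0, 0, 1, 0, 1, 1, 1, 1, 1, 1, 0, 0, 0, 1, 0, 1, 0, 0, 1, 0, 1, 1, 0, 0, 1, 1, 1, 0, 0, 1, 1, 1, 0, 0, 0, 1, 0, 1, 1, 0, 0, 1, 0, 1, 1, 1, 0, 1, 0, 1, 1, 0, 0, 1, 0, 0, 1, 0, 1, 0, 0, 0, 0, 1, 0, 0, 1, 1, 0, 1, 1, 0, 0, 1, 1, 0, 1, 1, 1, 1, 0, 1, 0, 0, 0, 1, 1, 1, 0, 0, 0, 0, 1, 0, 1, 0, 1, 0, 0, 1, 0, 0, 0, 1, 0, 1, 0, 0, 0, 0, 0, 0, 1, 0, 0, 0, 0, 0, 1, 0, 0, 0, 1, 0, 0, 1, 1, 0, 0, 1, 1, 1, 0, 1, 1, 0, 0, 1, 0, 1, 0, 1, 1, 0, 1, 1, 0, 1, 1, 1, 1, 1, 0, 1, 0, 0, 0, 0, 1, 0, 1, 1, 0, 1, 0, 1, 1, 1, 0, 1, 1, 0, 0,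 0, 0, 0, 1, 0, 1, 1, 0, 0, 0, 0, 0, 0, 0, 0, 0, 1, 0, 1, 1, 1, 0, 1, 1, 1, 0, 1, 1, 1, 1, 1, 0, 0, 0, 1, 1, 1, 1, 1, 0, 0, 0, 0, 1, 0, 0, 0, 0, 1, 1, 1, 1, 1, 1, 1, 1, 0, 1, 1, 1, 0, 0, 0, 0, 1, 1, 1, 1, 0, 1, 0, 0, 1, 1, 0, 0, 1, 0, 1, 1, 0, 0, 0, 1, 0, 1, 1, 1, 0, 0, 1, 0, 1, 0, 1, 0, 0, 0, 0, 1, 1, 0, 0, 0, 1, 1, 0, 1, 1, 1, 0, 1, 0, 0, 0, 1, 0, 1, 1, 1, 1, 0, 0, 1, 0, 0, 0, 1, 1, 0, 1, 0, 0, 1, 1, 0, 1, 1, 1, 0, 0, 0, 1, 1, 0, 0, 0, 0, 0, 1, 1, 1, 0, 1, 1, 0, 1, 1, 1, 0, 1, 1, 0, 1, 0, 1, 1, 0, 0, 0, 0, 1, 0, 1, 1, 1, 1, 1, 0, 0, 1, 1, 0, 0, 0, 1, 1, 1, 1, 0, 0, 1, 1, 1, 1, 1, 1, 1, 0, 0,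 0, 0, 0, 0, 1, 1, 1, 1, 0, 0, 0, 1, 0, 0, 0, 1, 0, 1, 1, 0, 1, 1, 1, 0, 0, 1, 1, 0, 1, 1, 0, 1, 1, 0, 1, 0, 1, 0, 0, 1, 1, 1, 1, 1, 0, 0, 1, 0, 0, 1, 1, 0, 1, 0, 0, 1, 0, 0, 0, 0, 0, 0, 1, 1, 0, 1, 1, 1, 1, 1, 1, 1, 1, 1]

theorem pv_bxor_zero_left (x : Int) : PySem.Int.bxor 0 x = x := by
  rw [PySem.Int.bxor_comm, PySem.Int.bxor_zero]

theorem pv_bxor01 {a b : Int} (ha : a = 0 ∨ a = 1) (hb : b = 0 ∨ b = 1) :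
    PySem.Int.bxor a b = 0 ∨ PySem.Int.bxor a b = 1 := by
  rcases ha with h | h <;> rcases hb with h' | h' <;> subst h <;> subst h' <;> decide

theorem pv_get01 {r : List Int} (hr : pvOk r) (j : Int) :
    (PySem.List.pyGet? r j).getD 0 = 0 ∨ (PySem.List.pyGet? r j).getD 0 = 1 := by
  cases h : PySem.List.pyGet? r j with
  | none => simp
  | some x =>
    simp only [Option.getD_some]
    exact hr.2 x (PySem.List.mem_of_pyGet?_eq_some r h)

-- the tail of one register shift is take 9
theorem pv_step_tail {r : List Int} (hr : r.length = 10) :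
    PySem.List.slice r (some 0) (some 9) = r.take 9 := by
  simp [PySem.List.slice, PySem.List.clampIdx, hr]

theorem pv_len_step (taps : List Int) {r : List Int} (hr : r.length = 10) :
    (genL1CA_lfsrStep taps r).length = 10 := by
  simp [genL1CA_lfsrStep, pv_step_tail hr, List.length_take, hr]

theorem pv_len_iter (taps : List Int) {r : List Int} (hr : r.length = 10) (k : Nat) :
    ((genL1CA_lfsrStep taps)^[k] r).length = 10 := by
  induction k generalizing r with
  | zero => simpa using hr
  | succ k ih => rw [Function.iterate_succ_apply]; exact ih (pv_len_step taps hr)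

theorem pv_ok_step (taps : List Int) {r : List Int} (hr : pvOk r) :
    pvOk (genL1CA_lfsrStep taps r) := by
  constructor
  · exact pv_len_step taps hr.1
  · intro x hx
    simp only [genL1CA_lfsrStep, pv_step_tail hr.1, List.mem_cons] at hx
    rcases hx with h | h
    · subst h
      have : ∀ (l : List Int) (g : Int), g = 0 ∨ g = 1 →
          (l.foldl (fun g t => PySem.Int.bxor g ((PySem.List.pyGet? r (t - 1)).getD 0)) g = 0 ∨
           l.foldl (fun g t => PySem.Int.bxor g ((PySem.List.pyGet? r (t - 1)).getD 0)) g = 1) := by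
        intro l
        induction l with
        | nil => intro g hg; simpa using hg
        | cons t l ih =>
          intro g hg
          exact ih _ (pv_bxor01 hg (pv_get01 hr _))
      exact this taps 0 (Or.inl rfl)
    · exact hr.2 x (List.mem_of_mem_take h)

-- A's combined register update is the pair of B's two register shifts
theorem pv_stepA_eq {a b : List Int} (ha : pvOk a) (hb : pvOk b) :
    genL1CA_stepA (a, b) = (genL1CA_lfsrStep [3, 10] a, genL1CA_lfsrStep [2, 3, 6, 8, 9, 10] b) := by
  have hta : PySem.List.slice a (some 0) (some (-1)) = a.take 9 := by
    simp [PySem.List.slice, PySem.List.clampIdx, ha.1]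
  have htb : PySem.List.slice b (some 0) (some (-1)) = b.take 9 := by
    simp [PySem.List.slice, PySem.List.clampIdx, hb.1]
  have hta9 := pv_step_tail ha.1
  have htb9 := pv_step_tail hb.1
  simp only [genL1CA_stepA, genL1CA_lfsrStep, List.foldl_cons, List.foldl_nil,
    hta, htb, hta9, htb9, Prod.mk.injEq]
  norm_num
  constructor
  · rw [pv_bxor_zero_left]
  · have h1 := pv_get01 hb (1 : Int)
    have h2 := pv_get01 hb (2 : Int)
    have h5 := pv_get01 hb (5 : Int)
    have h7 := pv_get01 hb (7 : Int)
    have h8 := pv_get01 hb (8 : Int)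
    have h9 := pv_get01 hb (9 : Int)
    rcases h1 with e1 | e1 <;> rcases h2 with e2 | e2 <;> rcases h5 with e5 | e5 <;>
      rcases h7 with e7 | e7 <;> rcases h8 with e8 | e8 <;> rcases h9 with e9 | e9 <;>
      rw [e1, e2, e5, e7, e8, e9] <;> decide

theorem pv_pair_iter {a b : List Int} (ha : pvOk a) (hb : pvOk b) (k : Nat) :
    genL1CA_stepA^[k] (a, b) =
      ((genL1CA_lfsrStep [3, 10])^[k] a, (genL1CA_lfsrStep [2, 3, 6, 8, 9, 10])^[k] b) := by
  induction k generalizing a b with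
  | zero => simp
  | succ k ih =>
    rw [Function.iterate_succ_apply, Function.iterate_succ_apply, Function.iterate_succ_apply,
        pv_stepA_eq ha hb]
    exact ih (pv_ok_step _ ha) (pv_ok_step _ hb)

-- cell j of the register after t shifts is output chip t + (9 - j)
theorem pv_cell (taps : List Int) {r : List Int} (hr : r.length = 10) (m : Nat) (hm : m ≤ 9) :
    ∀ t, ((genL1CA_lfsrStep taps)^[t] r)[9 - m]? = some (pvO taps r (t + m)) := by
  induction m with
  | zero =>
    intro t
    have hl : ((genL1CA_lfsrStep taps)^[t] r).length = 10 := pv_len_iter taps hr t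
    have h9 : (9 : Nat) < ((genL1CA_lfsrStep taps)^[t] r).length := by omega
    rw [show (9 - 0 : Nat) = 9 from rfl, List.getElem?_eq_getElem h9]
    simp [pvO, PySem.List.pyGet?, PySem.List.pyIdx?, hl]
  | succ m ih =>
    intro t
    have hm' : m ≤ 9 := by omega
    have step_get : ∀ (r' : List Int), r'.length = 10 → ∀ j, j < 9 →
        (genL1CA_lfsrStep taps r')[j + 1]? = r'[j]? := by
      intro r' hr' j hj
      simp only [genL1CA_lfsrStep, pv_step_tail hr', List.getElem?_cons_succ]
      rw [List.getElem?_take]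
      simp [hj]
    have hiter : ((genL1CA_lfsrStep taps)^[t + 1] r) =
        genL1CA_lfsrStep taps ((genL1CA_lfsrStep taps)^[t] r) := Function.iterate_succ_apply' _ _ _
    have hkey := step_get ((genL1CA_lfsrStep taps)^[t] r) (pv_len_iter taps hr t) (9 - (m + 1)) (by omega)
    rw [show (9 - (m + 1)) + 1 = 9 - m from by omega] at hkey
    rw [← hkey, ← hiter, ih hm' (t + 1), show t + 1 + m = t + (m + 1) from by omega]

-- element k of the LFSR output list
theorem pv_lfsr_get (taps : List Int) : ∀ (r : List Int) (n k : Nat), k < n →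
    (genL1CA_lfsrLoop taps r n)[k]? = some (pvO taps r k) := by
  intro r n k
  induction k generalizing r n with
  | zero =>
    intro h
    match n, h with
    | n + 1, _ => simp [genL1CA_lfsrLoop, pvO]
  | succ k ih =>
    intro h
    match n, h with
    | n + 1, h =>
      have hk : k < n := by omega
      simp only [genL1CA_lfsrLoop, List.getElem?_cons_succ]
      rw [ih _ n hk]
      simp [pvO, Function.iterate_succ_apply]

theorem pv_lfsr_len (taps : List Int) : ∀ (r : List Int) (n : Nat),
    (genL1CA_lfsrLoop taps r n).length = n := by
  intro r n
  induction n generalizing r with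
  | zero => simp [genL1CA_lfsrLoop]
  | succ n ih => simp [genL1CA_lfsrLoop, ih]

theorem pv_loopA_get (i0 i1 : Int) : ∀ (st : List Int × List Int) (n k : Nat), k < n →
    (genL1CA_loop i0 i1 st n)[k]? = some (genL1CA_outA i0 i1 (genL1CA_stepA^[k] st)) := by
  intro st n k
  induction k generalizing st n with
  | zero =>
    intro h
    match n, h with
    | n + 1, _ => simp [genL1CA_loop]
  | succ k ih =>
    intro h
    match n, h with
    | n + 1, h =>
      have hk : k < n := by omega
      simp only [genL1CA_loop, List.getElem?_cons_succ]
      rw [ih _ n hk]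
      simp [Function.iterate_succ_apply]

theorem pv_loopA_len (i0 i1 : Int) : ∀ (st : List Int × List Int) (n : Nat),
    (genL1CA_loop i0 i1 st n).length = n := by
  intro st n
  induction n generalizing st with
  | zero => simp [genL1CA_loop]
  | succ n ih => simp [genL1CA_loop, ih]

-- A's chip t in terms of the two output sequences
theorem pv_chip (j0 j1 : Nat) (hj0 : j0 ≤ 9) (hj1 : j1 ≤ 9) (t : Nat) :
    genL1CA_outA (j0 : Int) (j1 : Int)
        (genL1CA_stepA^[t] (List.replicate 10 (1 : Int), List.replicate 10 (1 : Int))) =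
      PySem.Int.bxor (pvO [3, 10] (List.replicate 10 (1 : Int)) t)
        (PySem.Int.bxor (pvO [2, 3, 6, 8, 9, 10] (List.replicate 10 (1 : Int)) (t + (9 - j0)))
          (pvO [2, 3, 6, 8, 9, 10] (List.replicate 10 (1 : Int)) (t + (9 - j1)))) := by
  have hok : pvOk (List.replicate 10 (1 : Int)) := by
    refine ⟨by simp, ?_⟩
    intro x hx
    right
    exact List.eq_of_mem_replicate hx
  rw [pv_pair_iter hok hok]
  simp only [genL1CA_outA]
  have hl1 : ((genL1CA_lfsrStep [3, 10])^[t] (List.replicate 10 (1 : Int))).length = 10 :=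
    pv_len_iter _ (by simp) t
  -- G1[-1] is the stage-10 cell, i.e. output chip t
  have hG1 : PySem.List.pyGet? ((genL1CA_lfsrStep [3, 10])^[t] (List.replicate 10 (1 : Int))) (-1)
      = some (pvO [3, 10] (List.replicate 10 (1 : Int)) t) := by
    rw [PySem.List.pyGet?_neg_one, List.getLast?_eq_getElem?, hl1]
    have := pv_cell [3, 10] (by simp : (List.replicate 10 (1 : Int)).length = 10) 0 (by omega) t
    simpa using this
  -- G2[j] is output chip t + (9 - j)
  have hG2 : ∀ j : Nat, j ≤ 9 →
      PySem.List.pyGet? ((genL1CA_lfsrStep [2, 3, 6, 8, 9, 10])^[t] (List.replicate 10 (1 : Int))) (j : Int)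
        = some (pvO [2, 3, 6, 8, 9, 10] (List.replicate 10 (1 : Int)) (t + (9 - j))) := by
    intro j hj
    rw [PySem.List.pyGet?_natCast]
    have hc := pv_cell [2, 3, 6, 8, 9, 10] (by simp : (List.replicate 10 (1 : Int)).length = 10)
      (9 - j) (by omega) t
    rw [show 9 - (9 - j) = j from by omega] at hc
    exact hc
  rw [hG1, hG2 j0 hj0, hG2 j1 hj1]
  simp

-- the per-PRN literal identity lifted to the general statement
theorem pvMaster (j0 j1 d : Nat) (hj0 : j0 ≤ 9) (hj1 : j1 ≤ 9) (hd0 : 0 < d) (hd : d ≤ 1023)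
    (Hv : List.zipWith (fun a b => PySem.Int.bxor a b)
            (((genL1CA_lfsrLoop [2, 3, 6, 8, 9, 10] (List.replicate 10 (1 : Int)) 1032).drop (9 - j0)).take 1023)
            (((genL1CA_lfsrLoop [2, 3, 6, 8, 9, 10] (List.replicate 10 (1 : Int)) 1032).drop (9 - j1)).take 1023)
          = ((genL1CA_lfsrLoop [2, 3, 6, 8, 9, 10] (List.replicate 10 (1 : Int)) 1032).drop (1023 - d)).take d
            ++ (genL1CA_lfsrLoop [2, 3, 6, 8, 9, 10] (List.replicate 10 (1 : Int)) 1032).take (1023 - d)) :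
    genL1CA_loop (j0 : Int) (j1 : Int) (List.replicate 10 (1 : Int), List.replicate 10 (1 : Int)) 1023
      = List.zipWith (fun a b => PySem.Int.bxor a b)
          (genL1CA_lfsrLoop [3, 10] (List.replicate 10 (1 : Int)) 1023)
          (PySem.List.slice (genL1CA_lfsrLoop [2, 3, 6, 8, 9, 10] (List.replicate 10 (1 : Int)) 1023) (some ((1023 - d : Nat) : Int)) none
           ++ PySem.List.slice (genL1CA_lfsrLoop [2, 3, 6, 8, 9, 10] (List.replicate 10 (1 : Int)) 1023) none (some ((1023 - d : Nat) : Int))) := by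
  have hF : ∀ k, k < 1032 →
      (genL1CA_lfsrLoop [2, 3, 6, 8, 9, 10] (List.replicate 10 (1 : Int)) 1032)[k]? =
        some (pvO [2, 3, 6, 8, 9, 10] (List.replicate 10 (1 : Int)) k) :=
    fun k hk => pv_lfsr_get _ _ _ k hk
  have hg : ∀ k, k < 1023 →
      (genL1CA_lfsrLoop [2, 3, 6, 8, 9, 10] (List.replicate 10 (1 : Int)) 1023)[k]? =
        some (pvO [2, 3, 6, 8, 9, 10] (List.replicate 10 (1 : Int)) k) :=
    fun k hk => pv_lfsr_get _ _ _ k hk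
  apply List.ext_getElem?
  intro n
  rw [PySem.List.slice_from_natCast, PySem.List.slice_to_natCast]
  by_cases hn : n < 1023
  · rw [pv_loopA_get _ _ _ 1023 n hn, pv_chip j0 j1 hj0 hj1 n, List.getElem?_zipWith,
        pv_lfsr_get [3, 10] _ 1023 n hn, List.getElem?_append, List.length_drop,
        pv_lfsr_len]
    -- Hv at position n
    have hv := congrArg (fun l => l[n]?) Hv
    simp only [List.getElem?_zipWith] at hv
    rw [List.getElem?_take, if_pos hn, List.getElem?_drop, hF _ (by omega),
        List.getElem?_take, if_pos hn, List.getElem?_drop, hF _ (by omega),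
        List.getElem?_append, List.length_take, List.length_drop, pv_lfsr_len] at hv
    rw [show min d (1032 - (1023 - d)) = d from by omega] at hv
    rw [show (1023 : Nat) - (1023 - d) = d from by omega]
    by_cases hnd : n < d
    · rw [if_pos hnd] at hv ⊢
      rw [List.getElem?_take, if_pos (by omega), List.getElem?_drop, hF _ (by omega)] at hv
      rw [List.getElem?_drop, hg _ (by omega)]
      rw [Nat.add_comm n (9 - j0), Nat.add_comm n (9 - j1)]
      rw [Option.some.inj hv]
    · rw [if_neg hnd] at hv ⊢
      rw [List.getElem?_take, if_pos (by omega), hF _ (by omega)] at hv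
      rw [List.getElem?_take, if_pos (by omega), hg _ (by omega)]
      rw [Nat.add_comm n (9 - j0), Nat.add_comm n (9 - j1)]
      rw [Option.some.inj hv]
  · rw [List.getElem?_eq_none (by rw [pv_loopA_len]; omega),
        List.getElem?_eq_none]
    simp only [List.length_zipWith, List.length_append, List.length_take, List.length_drop,
      pv_lfsr_len]
    omega

-- chunked evaluation of the literal G2 output sequence
set_option maxRecDepth 40000 in
theorem pv_regG2a : (genL1CA_lfsrStep [2, 3, 6, 8, 9, 10])^[256] (List.replicate 10 (1 : Int)) = [1, 0, 1, 0, 1, 0, 1, 0, 0, 1] := by decide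
set_option maxRecDepth 40000 in
theorem pv_regG2b : (genL1CA_lfsrStep [2, 3, 6, 8, 9, 10])^[256] ([1, 0, 1, 0, 1, 0, 1, 0, 0, 1] : List Int) = [1, 1, 0, 0, 1, 1, 1, 0, 0, 0] := by decide
set_option maxRecDepth 40000 in
theorem pv_regG2c : (genL1CA_lfsrStep [2, 3, 6, 8, 9, 10])^[256] ([1, 1, 0, 0, 1, 1, 1, 0, 0, 0] : List Int) = [1, 1, 0, 1, 0, 0, 0, 0, 0, 0] := by decide

theorem genL1CA_lfsrLoop_split (taps r : List Int) (a b : Nat) :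
    genL1CA_lfsrLoop taps r (a + b) =
      genL1CA_lfsrLoop taps r a ++ genL1CA_lfsrLoop taps ((genL1CA_lfsrStep taps)^[a] r) b := by
  induction a generalizing r with
  | zero => simp [genL1CA_lfsrLoop]
  | succ a ih =>
    have h : a + 1 + b = (a + b) + 1 := by omega
    rw [h]
    simp [genL1CA_lfsrLoop, ih, Function.iterate_succ_apply]

set_option maxRecDepth 100000 in
set_option maxHeartbeats 1000000 in
theorem pv_g2_lit : genL1CA_lfsrLoop [2, 3, 6, 8, 9, 10] (List.replicate 10 (1 : Int)) 1032 = pvG2Lit := by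
  rw [show (1032 : Nat) = 256 + (256 + (256 + 264)) from rfl,
      genL1CA_lfsrLoop_split, pv_regG2a, genL1CA_lfsrLoop_split, pv_regG2b,
      genL1CA_lfsrLoop_split, pv_regG2c]
  decide

set_option maxRecDepth 10000 in
theorem genL1CA_eq_1 : genL1CA 1 = genL1CA_alt 1 := by
  have hA : genL1CA 1 = genL1CA_loop 1 5 (List.replicate 10 (1 : Int), List.replicate 10 (1 : Int)) 1023 := rfl
  have hB : genL1CA_alt 1 =
      List.zipWith (fun a b => PySem.Int.bxor a b)
        (genL1CA_lfsrLoop [3, 10] (List.replicate 10 (1 : Int)) 1023)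
        (PySem.List.slice (genL1CA_lfsrLoop [2, 3, 6, 8, 9, 10] (List.replicate 10 (1 : Int)) 1023) (some 1018) none ++
         PySem.List.slice (genL1CA_lfsrLoop [2, 3, 6, 8, 9, 10] (List.replicate 10 (1 : Int)) 1023) none (some 1018)) := rfl
  rw [hA, hB]
  exact pvMaster 1 5 5 (by norm_num) (by norm_num) (by norm_num) (by norm_num)
    (by rw [pv_g2_lit]; decide)

set_option maxRecDepth 10000 in
theorem genL1CA_eq_2 : genL1CA 2 = genL1CA_alt 2 := by
  have hA : genL1CA 2 = genL1CA_loop 2 6 (List.replicate 10 (1 : Int), List.replicate 10 (1 : Int)) 1023 := rfl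
  have hB : genL1CA_alt 2 =
      List.zipWith (fun a b => PySem.Int.bxor a b)
        (genL1CA_lfsrLoop [3, 10] (List.replicate 10 (1 : Int)) 1023)
        (PySem.List.slice (genL1CA_lfsrLoop [2, 3, 6, 8, 9, 10] (List.replicate 10 (1 : Int)) 1023) (some 1017) none ++
         PySem.List.slice (genL1CA_lfsrLoop [2, 3, 6, 8, 9, 10] (List.replicate 10 (1 : Int)) 1023) none (some 1017)) := rfl
  rw [hA, hB]
  exact pvMaster 2 6 6 (by norm_num) (by norm_num) (by norm_num) (by norm_num)
    (by rw [pv_g2_lit]; decide)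

set_option maxRecDepth 10000 in
theorem genL1CA_eq_3 : genL1CA 3 = genL1CA_alt 3 := by
  have hA : genL1CA 3 = genL1CA_loop 3 7 (List.replicate 10 (1 : Int), List.replicate 10 (1 : Int)) 1023 := rfl
  have hB : genL1CA_alt 3 =
      List.zipWith (fun a b => PySem.Int.bxor a b)
        (genL1CA_lfsrLoop [3, 10] (List.replicate 10 (1 : Int)) 1023)
        (PySem.List.slice (genL1CA_lfsrLoop [2, 3, 6, 8, 9, 10] (List.replicate 10 (1 : Int)) 1023) (some 1016) none ++
         PySem.List.slice (genL1CA_lfsrLoop [2, 3, 6, 8, 9, 10] (List.replicate 10 (1 : Int)) 1023) none (some 1016)) := rfl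
  rw [hA, hB]
  exact pvMaster 3 7 7 (by norm_num) (by norm_num) (by norm_num) (by norm_num)
    (by rw [pv_g2_lit]; decide)

set_option maxRecDepth 10000 in
theorem genL1CA_eq_4 : genL1CA 4 = genL1CA_alt 4 := by
  have hA : genL1CA 4 = genL1CA_loop 4 8 (List.replicate 10 (1 : Int), List.replicate 10 (1 : Int)) 1023 := rfl
  have hB : genL1CA_alt 4 =
      List.zipWith (fun a b => PySem.Int.bxor a b)
        (genL1CA_lfsrLoop [3, 10] (List.replicate 10 (1 : Int)) 1023)
        (PySem.List.slice (genL1CA_lfsrLoop [2, 3, 6, 8, 9, 10] (List.replicate 10 (1 : Int)) 1023) (some 1015) none ++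
         PySem.List.slice (genL1CA_lfsrLoop [2, 3, 6, 8, 9, 10] (List.replicate 10 (1 : Int)) 1023) none (some 1015)) := rfl
  rw [hA, hB]
  exact pvMaster 4 8 8 (by norm_num) (by norm_num) (by norm_num) (by norm_num)
    (by rw [pv_g2_lit]; decide)

set_option maxRecDepth 10000 in
theorem genL1CA_eq_5 : genL1CA 5 = genL1CA_alt 5 := by
  have hA : genL1CA 5 = genL1CA_loop 0 8 (List.replicate 10 (1 : Int), List.replicate 10 (1 : Int)) 1023 := rfl
  have hB : genL1CA_alt 5 =
      List.zipWith (fun a b => PySem.Int.bxor a b)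
        (genL1CA_lfsrLoop [3, 10] (List.replicate 10 (1 : Int)) 1023)
        (PySem.List.slice (genL1CA_lfsrLoop [2, 3, 6, 8, 9, 10] (List.replicate 10 (1 : Int)) 1023) (some 1006) none ++
         PySem.List.slice (genL1CA_lfsrLoop [2, 3, 6, 8, 9, 10] (List.replicate 10 (1 : Int)) 1023) none (some 1006)) := rfl
  rw [hA, hB]
  exact pvMaster 0 8 17 (by norm_num) (by norm_num) (by norm_num) (by norm_num)
    (by rw [pv_g2_lit]; decide)

set_option maxRecDepth 10000 in
theorem genL1CA_eq_6 : genL1CA 6 = genL1CA_alt 6 := by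
  have hA : genL1CA 6 = genL1CA_loop 1 9 (List.replicate 10 (1 : Int), List.replicate 10 (1 : Int)) 1023 := rfl
  have hB : genL1CA_alt 6 =
      List.zipWith (fun a b => PySem.Int.bxor a b)
        (genL1CA_lfsrLoop [3, 10] (List.replicate 10 (1 : Int)) 1023)
        (PySem.List.slice (genL1CA_lfsrLoop [2, 3, 6, 8, 9, 10] (List.replicate 10 (1 : Int)) 1023) (some 1005) none ++
         PySem.List.slice (genL1CA_lfsrLoop [2, 3, 6, 8, 9, 10] (List.replicate 10 (1 : Int)) 1023) none (some 1005)) := rfl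
  rw [hA, hB]
  exact pvMaster 1 9 18 (by norm_num) (by norm_num) (by norm_num) (by norm_num)
    (by rw [pv_g2_lit]; decide)

set_option maxRecDepth 10000 in
theorem genL1CA_eq_7 : genL1CA 7 = genL1CA_alt 7 := by
  have hA : genL1CA 7 = genL1CA_loop 0 7 (List.replicate 10 (1 : Int), List.replicate 10 (1 : Int)) 1023 := rfl
  have hB : genL1CA_alt 7 =
      List.zipWith (fun a b => PySem.Int.bxor a b)
        (genL1CA_lfsrLoop [3, 10] (List.replicate 10 (1 : Int)) 1023)
        (PySem.List.slice (genL1CA_lfsrLoop [2, 3, 6, 8, 9, 10] (List.replicate 10 (1 : Int)) 1023) (some 884) none ++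
         PySem.List.slice (genL1CA_lfsrLoop [2, 3, 6, 8, 9, 10] (List.replicate 10 (1 : Int)) 1023) none (some 884)) := rfl
  rw [hA, hB]
  exact pvMaster 0 7 139 (by norm_num) (by norm_num) (by norm_num) (by norm_num)
    (by rw [pv_g2_lit]; decide)

set_option maxRecDepth 10000 in
theorem genL1CA_eq_8 : genL1CA 8 = genL1CA_alt 8 := by
  have hA : genL1CA 8 = genL1CA_loop 1 8 (List.replicate 10 (1 : Int), List.replicate 10 (1 : Int)) 1023 := rfl
  have hB : genL1CA_alt 8 =
      List.zipWith (fun a b => PySem.Int.bxor a b)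
        (genL1CA_lfsrLoop [3, 10] (List.replicate 10 (1 : Int)) 1023)
        (PySem.List.slice (genL1CA_lfsrLoop [2, 3, 6, 8, 9, 10] (List.replicate 10 (1 : Int)) 1023) (some 883) none ++
         PySem.List.slice (genL1CA_lfsrLoop [2, 3, 6, 8, 9, 10] (List.replicate 10 (1 : Int)) 1023) none (some 883)) := rfl
  rw [hA, hB]
  exact pvMaster 1 8 140 (by norm_num) (by norm_num) (by norm_num) (by norm_num)
    (by rw [pv_g2_lit]; decide)

set_option maxRecDepth 10000 in
theorem genL1CA_eq_9 : genL1CA 9 = genL1CA_alt 9 := by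
  have hA : genL1CA 9 = genL1CA_loop 2 9 (List.replicate 10 (1 : Int), List.replicate 10 (1 : Int)) 1023 := rfl
  have hB : genL1CA_alt 9 =
      List.zipWith (fun a b => PySem.Int.bxor a b)
        (genL1CA_lfsrLoop [3, 10] (List.replicate 10 (1 : Int)) 1023)
        (PySem.List.slice (genL1CA_lfsrLoop [2, 3, 6, 8, 9, 10] (List.replicate 10 (1 : Int)) 1023) (some 882) none ++
         PySem.List.slice (genL1CA_lfsrLoop [2, 3, 6, 8, 9, 10] (List.replicate 10 (1 : Int)) 1023) none (some 882)) := rfl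
  rw [hA, hB]
  exact pvMaster 2 9 141 (by norm_num) (by norm_num) (by norm_num) (by norm_num)
    (by rw [pv_g2_lit]; decide)

set_option maxRecDepth 10000 in
theorem genL1CA_eq_10 : genL1CA 10 = genL1CA_alt 10 := by
  have hA : genL1CA 10 = genL1CA_loop 1 2 (List.replicate 10 (1 : Int), List.replicate 10 (1 : Int)) 1023 := rfl
  have hB : genL1CA_alt 10 =
      List.zipWith (fun a b => PySem.Int.bxor a b)
        (genL1CA_lfsrLoop [3, 10] (List.replicate 10 (1 : Int)) 1023)
        (PySem.List.slice (genL1CA_lfsrLoop [2, 3, 6, 8, 9, 10] (List.replicate 10 (1 : Int)) 1023) (some 772) none ++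
         PySem.List.slice (genL1CA_lfsrLoop [2, 3, 6, 8, 9, 10] (List.replicate 10 (1 : Int)) 1023) none (some 772)) := rfl
  rw [hA, hB]
  exact pvMaster 1 2 251 (by norm_num) (by norm_num) (by norm_num) (by norm_num)
    (by rw [pv_g2_lit]; decide)

set_option maxRecDepth 10000 in
theorem genL1CA_eq_11 : genL1CA 11 = genL1CA_alt 11 := by
  have hA : genL1CA 11 = genL1CA_loop 2 3 (List.replicate 10 (1 : Int), List.replicate 10 (1 : Int)) 1023 := rfl
  have hB : genL1CA_alt 11 =
      List.zipWith (fun a b => PySem.Int.bxor a b)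
        (genL1CA_lfsrLoop [3, 10] (List.replicate 10 (1 : Int)) 1023)
        (PySem.List.slice (genL1CA_lfsrLoop [2, 3, 6, 8, 9, 10] (List.replicate 10 (1 : Int)) 1023) (some 771) none ++
         PySem.List.slice (genL1CA_lfsrLoop [2, 3, 6, 8, 9, 10] (List.replicate 10 (1 : Int)) 1023) none (some 771)) := rfl
  rw [hA, hB]
  exact pvMaster 2 3 252 (by norm_num) (by norm_num) (by norm_num) (by norm_num)
    (by rw [pv_g2_lit]; decide)

set_option maxRecDepth 10000 in
theorem genL1CA_eq_12 : genL1CA 12 = genL1CA_alt 12 := by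
  have hA : genL1CA 12 = genL1CA_loop 4 5 (List.replicate 10 (1 : Int), List.replicate 10 (1 : Int)) 1023 := rfl
  have hB : genL1CA_alt 12 =
      List.zipWith (fun a b => PySem.Int.bxor a b)
        (genL1CA_lfsrLoop [3, 10] (List.replicate 10 (1 : Int)) 1023)
        (PySem.List.slice (genL1CA_lfsrLoop [2, 3, 6, 8, 9, 10] (List.replicate 10 (1 : Int)) 1023) (some 769) none ++
         PySem.List.slice (genL1CA_lfsrLoop [2, 3, 6, 8, 9, 10] (List.replicate 10 (1 : Int)) 1023) none (some 769)) := rfl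
  rw [hA, hB]
  exact pvMaster 4 5 254 (by norm_num) (by norm_num) (by norm_num) (by norm_num)
    (by rw [pv_g2_lit]; decide)

set_option maxRecDepth 10000 in
theorem genL1CA_eq_13 : genL1CA 13 = genL1CA_alt 13 := by
  have hA : genL1CA 13 = genL1CA_loop 5 6 (List.replicate 10 (1 : Int), List.replicate 10 (1 : Int)) 1023 := rfl
  have hB : genL1CA_alt 13 =
      List.zipWith (fun a b => PySem.Int.bxor a b)
        (genL1CA_lfsrLoop [3, 10] (List.replicate 10 (1 : Int)) 1023)
        (PySem.List.slice (genL1CA_lfsrLoop [2, 3, 6, 8, 9, 10] (List.replicate 10 (1 : Int)) 1023) (some 768) none ++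
         PySem.List.slice (genL1CA_lfsrLoop [2, 3, 6, 8, 9, 10] (List.replicate 10 (1 : Int)) 1023) none (some 768)) := rfl
  rw [hA, hB]
  exact pvMaster 5 6 255 (by norm_num) (by norm_num) (by norm_num) (by norm_num)
    (by rw [pv_g2_lit]; decide)

set_option maxRecDepth 10000 in
theorem genL1CA_eq_14 : genL1CA 14 = genL1CA_alt 14 := by
  have hA : genL1CA 14 = genL1CA_loop 6 7 (List.replicate 10 (1 : Int), List.replicate 10 (1 : Int)) 1023 := rfl
  have hB : genL1CA_alt 14 =
      List.zipWith (fun a b => PySem.Int.bxor a b)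
        (genL1CA_lfsrLoop [3, 10] (List.replicate 10 (1 : Int)) 1023)
        (PySem.List.slice (genL1CA_lfsrLoop [2, 3, 6, 8, 9, 10] (List.replicate 10 (1 : Int)) 1023) (some 767) none ++
         PySem.List.slice (genL1CA_lfsrLoop [2, 3, 6, 8, 9, 10] (List.replicate 10 (1 : Int)) 1023) none (some 767)) := rfl
  rw [hA, hB]
  exact pvMaster 6 7 256 (by norm_num) (by norm_num) (by norm_num) (by norm_num)
    (by rw [pv_g2_lit]; decide)

set_option maxRecDepth 10000 in
theorem genL1CA_eq_15 : genL1CA 15 = genL1CA_alt 15 := by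
  have hA : genL1CA 15 = genL1CA_loop 7 8 (List.replicate 10 (1 : Int), List.replicate 10 (1 : Int)) 1023 := rfl
  have hB : genL1CA_alt 15 =
      List.zipWith (fun a b => PySem.Int.bxor a b)
        (genL1CA_lfsrLoop [3, 10] (List.replicate 10 (1 : Int)) 1023)
        (PySem.List.slice (genL1CA_lfsrLoop [2, 3, 6, 8, 9, 10] (List.replicate 10 (1 : Int)) 1023) (some 766) none ++
         PySem.List.slice (genL1CA_lfsrLoop [2, 3, 6, 8, 9, 10] (List.replicate 10 (1 : Int)) 1023) none (some 766)) := rfl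
  rw [hA, hB]
  exact pvMaster 7 8 257 (by norm_num) (by norm_num) (by norm_num) (by norm_num)
    (by rw [pv_g2_lit]; decide)

set_option maxRecDepth 10000 in
theorem genL1CA_eq_16 : genL1CA 16 = genL1CA_alt 16 := by
  have hA : genL1CA 16 = genL1CA_loop 8 9 (List.replicate 10 (1 : Int), List.replicate 10 (1 : Int)) 1023 := rfl
  have hB : genL1CA_alt 16 =
      List.zipWith (fun a b => PySem.Int.bxor a b)
        (genL1CA_lfsrLoop [3, 10] (List.replicate 10 (1 : Int)) 1023)
        (PySem.List.slice (genL1CA_lfsrLoop [2, 3, 6, 8, 9, 10] (List.replicate 10 (1 : Int)) 1023) (some 765) none ++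
         PySem.List.slice (genL1CA_lfsrLoop [2, 3, 6, 8, 9, 10] (List.replicate 10 (1 : Int)) 1023) none (some 765)) := rfl
  rw [hA, hB]
  exact pvMaster 8 9 258 (by norm_num) (by norm_num) (by norm_num) (by norm_num)
    (by rw [pv_g2_lit]; decide)

set_option maxRecDepth 10000 in
theorem genL1CA_eq_17 : genL1CA 17 = genL1CA_alt 17 := by
  have hA : genL1CA 17 = genL1CA_loop 0 3 (List.replicate 10 (1 : Int), List.replicate 10 (1 : Int)) 1023 := rfl
  have hB : genL1CA_alt 17 =
      List.zipWith (fun a b => PySem.Int.bxor a b)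
        (genL1CA_lfsrLoop [3, 10] (List.replicate 10 (1 : Int)) 1023)
        (PySem.List.slice (genL1CA_lfsrLoop [2, 3, 6, 8, 9, 10] (List.replicate 10 (1 : Int)) 1023) (some 554) none ++
         PySem.List.slice (genL1CA_lfsrLoop [2, 3, 6, 8, 9, 10] (List.replicate 10 (1 : Int)) 1023) none (some 554)) := rfl
  rw [hA, hB]
  exact pvMaster 0 3 469 (by norm_num) (by norm_num) (by norm_num) (by norm_num)
    (by rw [pv_g2_lit]; decide)

set_option maxRecDepth 10000 in
theorem genL1CA_eq_18 : genL1CA 18 = genL1CA_alt 18 := by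
  have hA : genL1CA 18 = genL1CA_loop 1 4 (List.replicate 10 (1 : Int), List.replicate 10 (1 : Int)) 1023 := rfl
  have hB : genL1CA_alt 18 =
      List.zipWith (fun a b => PySem.Int.bxor a b)
        (genL1CA_lfsrLoop [3, 10] (List.replicate 10 (1 : Int)) 1023)
        (PySem.List.slice (genL1CA_lfsrLoop [2, 3, 6, 8, 9, 10] (List.replicate 10 (1 : Int)) 1023) (some 553) none ++
         PySem.List.slice (genL1CA_lfsrLoop [2, 3, 6, 8, 9, 10] (List.replicate 10 (1 : Int)) 1023) none (some 553)) := rfl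
  rw [hA, hB]
  exact pvMaster 1 4 470 (by norm_num) (by norm_num) (by norm_num) (by norm_num)
    (by rw [pv_g2_lit]; decide)

set_option maxRecDepth 10000 in
theorem genL1CA_eq_19 : genL1CA 19 = genL1CA_alt 19 := by
  have hA : genL1CA 19 = genL1CA_loop 2 5 (List.replicate 10 (1 : Int), List.replicate 10 (1 : Int)) 1023 := rfl
  have hB : genL1CA_alt 19 =
      List.zipWith (fun a b => PySem.Int.bxor a b)
        (genL1CA_lfsrLoop [3, 10] (List.replicate 10 (1 : Int)) 1023)
        (PySem.List.slice (genL1CA_lfsrLoop [2, 3, 6, 8, 9, 10] (List.replicate 10 (1 : Int)) 1023) (some 552) none ++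
         PySem.List.slice (genL1CA_lfsrLoop [2, 3, 6, 8, 9, 10] (List.replicate 10 (1 : Int)) 1023) none (some 552)) := rfl
  rw [hA, hB]
  exact pvMaster 2 5 471 (by norm_num) (by norm_num) (by norm_num) (by norm_num)
    (by rw [pv_g2_lit]; decide)

set_option maxRecDepth 10000 in
theorem genL1CA_eq_20 : genL1CA 20 = genL1CA_alt 20 := by
  have hA : genL1CA 20 = genL1CA_loop 3 6 (List.replicate 10 (1 : Int), List.replicate 10 (1 : Int)) 1023 := rfl
  have hB : genL1CA_alt 20 =
      List.zipWith (fun a b => PySem.Int.bxor a b)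
        (genL1CA_lfsrLoop [3, 10] (List.replicate 10 (1 : Int)) 1023)
        (PySem.List.slice (genL1CA_lfsrLoop [2, 3, 6, 8, 9, 10] (List.replicate 10 (1 : Int)) 1023) (some 551) none ++
         PySem.List.slice (genL1CA_lfsrLoop [2, 3, 6, 8, 9, 10] (List.replicate 10 (1 : Int)) 1023) none (some 551)) := rfl
  rw [hA, hB]
  exact pvMaster 3 6 472 (by norm_num) (by norm_num) (by norm_num) (by norm_num)
    (by rw [pv_g2_lit]; decide)

-- ===== VERDICT (by name: the statement is the Claim_ definition above) =====
theorem genL1CA_spec : Claim_equal_genL1CA := by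
  unfold Claim_equal_genL1CA
  intro prn _ hpre
  unfold Spec_genL1CA
  obtain ⟨h1, h2⟩ := hpre
  interval_cases prn
  · exact genL1CA_eq_1
  · exact genL1CA_eq_2
  · exact genL1CA_eq_3
  · exact genL1CA_eq_4
  · exact genL1CA_eq_5
  · exact genL1CA_eq_6
  · exact genL1CA_eq_7
  · exact genL1CA_eq_8
  · exact genL1CA_eq_9
  · exact genL1CA_eq_10
  · exact genL1CA_eq_11
  · exact genL1CA_eq_12
  · exact genL1CA_eq_13
  · exact genL1CA_eq_14
  · exact genL1CA_eq_15
  · exact genL1CA_eq_16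
  · exact genL1CA_eq_17
  · exact genL1CA_eq_18
  · exact genL1CA_eq_19
  · exact genL1CA_eq_20
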